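-- pv_equiv track=rewrite | github.com/dayumstir/IS4103-Capstone | apps/credit-service/src/service.py | get_status_this_month
-- ===== SOURCE A (Python) =====
-- def get_status_this_month(payment_history, idx, defaulted_months, hasDefaultThisMonth):
--
--     # Base case: if the customer didn't default this month, return -1
--     if not hasDefaultThisMonth:
--         return -1
--
--     # Base case: payment history is empty and customer defaults
--     if len(payment_history) == 0:
--         return 1
--
--     # If we've reached the start of the list (idx < 0) or customer paid on time last month (payment_history[idx-1] == -1)
--     if idx <= 0 or payment_history[idx - 1] == -1:
--         return defaulted_months + 1  # Add 1 for this month's default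
--
--     # If the customer defaulted in the previous month, increment the default count
--     if payment_history[idx - 1] != -1:
--         defaulted_months += 1
--
--     # Cap at 6 defaults
--     if defaulted_months >= 6:
--         return 6
--
--     # Recursively check the previous months
--     return get_status_this_month(payment_history, idx - 1, defaulted_months, hasDefaultThisMonth)
-- ===== SOURCE B (Python) =====
-- def get_status_this_month(payment_history, idx, defaulted_months, hasDefaultThisMonth):
--     if not hasDefaultThisMonth:
--         return -1
--     if len(payment_history) == 0:
--         return 1
--     # Length of the consecutive run of defaulted months immediately before idx
--     run = 0
--     while idx - run > 0 and payment_history[idx - run - 1] != -1: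
--         run += 1
--     if run >= 6 - defaulted_months and run >= 1:
--         return 6
--     return defaulted_months + run + 1
-- ===== Notes on version B (the rewrite author's own statement) =====
-- stated objective: simpler
-- what changed: Replaces the bounded recursion over (idx, defaulted_months) by a single plain scan that measures the length of the consecutive-default run before idx and then computes the answer with one arithmetic/cap formula.
import Mathlib
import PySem

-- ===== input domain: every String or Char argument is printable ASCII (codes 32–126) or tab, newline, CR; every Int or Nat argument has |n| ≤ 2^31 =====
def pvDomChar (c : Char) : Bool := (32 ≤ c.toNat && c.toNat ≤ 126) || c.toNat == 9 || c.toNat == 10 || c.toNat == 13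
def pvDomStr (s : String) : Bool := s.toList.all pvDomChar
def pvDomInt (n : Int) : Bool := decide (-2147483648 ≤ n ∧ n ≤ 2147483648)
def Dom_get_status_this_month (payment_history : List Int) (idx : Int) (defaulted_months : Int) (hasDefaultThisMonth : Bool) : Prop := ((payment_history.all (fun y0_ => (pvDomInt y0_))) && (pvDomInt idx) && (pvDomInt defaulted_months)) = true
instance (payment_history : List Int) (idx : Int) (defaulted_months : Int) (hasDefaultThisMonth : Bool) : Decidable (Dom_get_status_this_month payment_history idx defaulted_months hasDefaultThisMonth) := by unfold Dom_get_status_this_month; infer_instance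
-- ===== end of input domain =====

-- B replaces A's bounded recursion by one backward scan for the run length plus a closed cap formula (objective: simpler).

-- ===== PORT A =====
-- literal transliteration of A's recursion; the list access payment_history[idx-1] is
-- PySem.List.pyGet?, with .getD 0 only on inputs Pre_ excludes (where Python raises IndexError)
def get_status_this_month (payment_history : List Int) (idx : Int) (defaulted_months : Int) (hasDefaultThisMonth : Bool) : Int :=
  if hasDefaultThisMonth = false then -1
  else if payment_history.length = 0 then 1
  else if idx ≤ 0 ∨ (PySem.List.pyGet? payment_history (idx - 1)).getD 0 = -1 then
    defaulted_months + 1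
  else
    let defaulted_months' :=
      if (PySem.List.pyGet? payment_history (idx - 1)).getD 0 ≠ -1 then defaulted_months + 1
      else defaulted_months
    if defaulted_months' ≥ 6 then 6
    else get_status_this_month payment_history (idx - 1) defaulted_months' hasDefaultThisMonth
termination_by idx.toNat
decreasing_by omega

-- ===== PORT B =====
-- the while-loop of Source B counting the consecutive-default run before idx
def pvAltRun (payment_history : List Int) (idx : Int) (run : Int) : Int :=
  if idx - run > 0 ∧ (PySem.List.pyGet? payment_history (idx - run - 1)).getD 0 ≠ -1 then
    pvAltRun payment_history idx (run + 1)
  else run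
termination_by (idx - run).toNat
decreasing_by omega

def get_status_this_month_alt (payment_history : List Int) (idx : Int) (defaulted_months : Int) (hasDefaultThisMonth : Bool) : Int :=
  if hasDefaultThisMonth = false then -1
  else if payment_history.length = 0 then 1
  else
    let run := pvAltRun payment_history idx 0
    if run ≥ 6 - defaulted_months ∧ run ≥ 1 then 6
    else defaulted_months + run + 1

-- ===== PRECONDITION & SPEC =====
-- Pre_ excludes exactly the inputs on which the Python A raises IndexError:
-- hasDefaultThisMonth with a nonempty history and idx beyond its length.
def Pre_get_status_this_month (payment_history : List Int) (idx : Int) (defaulted_months : Int) (hasDefaultThisMonth : Bool) : Prop :=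
  hasDefaultThisMonth = true → payment_history ≠ [] → idx ≤ payment_history.length
instance (payment_history : List Int) (idx : Int) (defaulted_months : Int) (hasDefaultThisMonth : Bool) : Decidable (Pre_get_status_this_month payment_history idx defaulted_months hasDefaultThisMonth) := by unfold Pre_get_status_this_month; infer_instance

def pvWitness_get_status_this_month : List Int × Int × Int × Bool := ([0, 0, -1, 2], 4, 1, true)

def Spec_get_status_this_month (payment_history : List Int) (idx : Int) (defaulted_months : Int) (hasDefaultThisMonth : Bool) (out : Int) : Prop := out = get_status_this_month_alt payment_history idx defaulted_months hasDefaultThisMonth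
instance (payment_history : List Int) (idx : Int) (defaulted_months : Int) (hasDefaultThisMonth : Bool) (out : Int) : Decidable (Spec_get_status_this_month payment_history idx defaulted_months hasDefaultThisMonth out) := by unfold Spec_get_status_this_month; infer_instance

-- ===== CLAIM (what is proved, stated in full; the proofs are below) =====
def Claim_equal_get_status_this_month : Prop := ∀ (payment_history : List Int) (idx : Int) (defaulted_months : Int) (hasDefaultThisMonth : Bool), Dom_get_status_this_month payment_history idx defaulted_months hasDefaultThisMonth → Pre_get_status_this_month payment_history idx defaulted_months hasDefaultThisMonth → Spec_get_status_this_month payment_history idx defaulted_months hasDefaultThisMonth (get_status_this_month payment_history idx defaulted_months hasDefaultThisMonth)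

-- ===== LEMMAS AND PROOFS =====

-- the loop never decreases its counter
theorem pvAltRun_ge (payment_history : List Int) (idx run : Int) :
    run ≤ pvAltRun payment_history idx run := by
  unfold pvAltRun
  split
  · have := pvAltRun_ge payment_history idx (run + 1)
    omega
  · omega
termination_by (idx - run).toNat
decreasing_by omega

-- shifting the start of the scan by one step
theorem pvAltRun_shift (payment_history : List Int) (idx run : Int) :
    pvAltRun payment_history idx (run + 1) = pvAltRun payment_history (idx - 1) run + 1 := by
  unfold pvAltRun
  have harith : idx - (run + 1) - 1 = idx - 1 - run - 1 := by ring
  have harith2 : idx - (run + 1) = idx - 1 - run := by ring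
  rw [harith, harith2]
  split
  · exact pvAltRun_shift payment_history idx (run + 1)
  · rfl
termination_by (idx - run).toNat
decreasing_by omega

-- the core equivalence, by the recursion of A
theorem pv_main (payment_history : List Int) (idx defaulted_months : Int)
    (hne : payment_history.length ≠ 0) :
    get_status_this_month payment_history idx defaulted_months true =
      (let run := pvAltRun payment_history idx 0;
       if run ≥ 6 - defaulted_months ∧ run ≥ 1 then 6 else defaulted_months + run + 1) := by
  rw [get_status_this_month]
  simp only [Bool.true_eq_false, if_false, if_neg hne]
  by_cases hb : idx ≤ 0 ∨ (PySem.List.pyGet? payment_history (idx - 1)).getD 0 = -1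
  · rw [if_pos hb]
    have hrun : pvAltRun payment_history idx 0 = 0 := by
      rw [pvAltRun]
      rw [if_neg]
      simp only [sub_zero]
      omega
    simp [hrun]
  · rw [if_neg hb]
    push Not at hb
    obtain ⟨hidx, hval⟩ := hb
    simp only [ne_eq, hval, not_false_eq_true, if_pos]
    have hrun0 : pvAltRun payment_history idx 0 = pvAltRun payment_history (idx - 1) 0 + 1 := by
      rw [pvAltRun]
      rw [if_pos (by simp only [sub_zero]; exact ⟨by omega, hval⟩)]
      have : (0 : Int) + 1 = 1 := by ring
      have h01 : pvAltRun payment_history idx 1 = pvAltRun payment_history (idx - 1) 0 + 1 := by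
        have := pvAltRun_shift payment_history idx 0
        simpa using this
      simpa using h01
    have hge : (0 : Int) ≤ pvAltRun payment_history (idx - 1) 0 :=
      pvAltRun_ge payment_history (idx - 1) 0
    set r := pvAltRun payment_history (idx - 1) 0 with hr
    by_cases hcap : defaulted_months + 1 ≥ 6
    · rw [if_pos hcap]
      rw [hrun0]
      rw [if_pos ⟨by omega, by omega⟩]
    · rw [if_neg hcap]
      have ih := pv_main payment_history (idx - 1) (defaulted_months + 1) hne
      rw [ih]
      simp only [hrun0, ← hr]
      by_cases h6 : r ≥ 6 - (defaulted_months + 1) ∧ r ≥ 1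
      · rw [if_pos h6, if_pos ⟨by omega, by omega⟩]
      · rw [if_neg h6]
        rw [if_neg (by omega)]
        ring
termination_by idx.toNat
decreasing_by omega

-- ===== VERDICT (by name: the statement is the Claim_ definition above) =====
theorem get_status_this_month_spec : Claim_equal_get_status_this_month := by
  intro payment_history idx defaulted_months hasDefaultThisMonth _ _
  unfold Spec_get_status_this_month
  cases hasDefaultThisMonth with
  | false => rw [get_status_this_month, get_status_this_month_alt]; simp
  | true =>
    by_cases hne : payment_history.length = 0
    · rw [get_status_this_month, get_status_this_month_alt]; simp [hne]
    · rw [pv_main payment_history idx defaulted_months hne]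
      rw [get_status_this_month_alt]
      simp [hne]
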